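-- pv_equiv track=rewrite | github.com/SophiaBhoria7/Container-Terminal-python | solution.py | minimum_stacks
-- ===== SOURCE A (Python) =====
-- def minimum_stacks(container_schedule):
--     stacks = []
--
--     for container in container_schedule:
--         placed = False
--         for stack in stacks:
--             if stack[-1] >= container:
--                 stack.append(container)
--                 placed = True
--                 break
--         if not placed:
--             stacks.append([container])
--
--     return len(stacks)
-- ===== SOURCE B (Python) =====
-- def minimum_stacks(container_schedule):
--     tops = []  # tops[i] = top of stack i; invariant: strictly increasing
--     for c in container_schedule:
--         lo, hi = 0, len(tops)
--         while lo < hi: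
--             mid = (lo + hi) // 2
--             if tops[mid] >= c:
--                 hi = mid
--             else:
--                 lo = mid + 1
--         if lo == len(tops):
--             tops.append(c)
--         else:
--             tops[lo] = c
--     return len(tops)
-- ===== Notes on version B (the rewrite author's own statement) =====
-- stated objective: faster
-- what changed: B keeps only the stack tops (a strictly increasing list) and binary-searches for the first top >= container instead of A's linear scan over whole stacks, patience-sorting style.
import Mathlib
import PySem

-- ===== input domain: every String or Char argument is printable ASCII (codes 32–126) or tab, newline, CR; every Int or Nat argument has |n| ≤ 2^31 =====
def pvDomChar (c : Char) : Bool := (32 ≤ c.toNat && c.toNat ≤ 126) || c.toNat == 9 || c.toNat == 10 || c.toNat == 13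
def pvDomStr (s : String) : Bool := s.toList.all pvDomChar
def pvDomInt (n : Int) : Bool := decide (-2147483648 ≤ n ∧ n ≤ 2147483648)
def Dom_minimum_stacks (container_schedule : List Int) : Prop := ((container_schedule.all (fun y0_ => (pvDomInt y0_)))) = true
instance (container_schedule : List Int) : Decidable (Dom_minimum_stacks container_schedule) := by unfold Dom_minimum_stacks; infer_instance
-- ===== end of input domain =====

-- B replaces A's inner linear scan over the stks with a binary search on the
-- (strictly increasing) list of stack tops — O(n log n) instead of O(n^2).

-- ===== PORT A =====
-- inner 'for stack in stks' loop with the 'placed' flag: append c to the first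
-- stack whose last element is ≥ c, else start a new stack at the end
def pvAStep (stks : List (List Int)) (c : Int) : List (List Int) :=
  match stks with
  | [] => [[c]]
  | s :: rest =>
    if (PySem.List.pyGet? s (-1)).getD 0 ≥ c then (s ++ [c]) :: rest
    else s :: pvAStep rest c

def minimum_stacks (container_schedule : List Int) : Int :=
  ((container_schedule.foldl pvAStep []).length : Int)

-- ===== PORT B =====
-- the 'while lo < hi' binary-search loop of Source B, recursion on hi - lo
def pvBsearch (tops : List Int) (c : Int) (lo hi : Nat) : Nat :=
  if lo < hi then
    let mid := (lo + hi) / 2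
    if (PySem.List.pyGet? tops (mid : Int)).getD 0 ≥ c then pvBsearch tops c lo mid
    else pvBsearch tops c (mid + 1) hi
  else lo
termination_by hi - lo
decreasing_by all_goals omega

-- one iteration of Source B's outer loop on the tops list
def pvBStep (tops : List Int) (c : Int) : List Int :=
  let lo := pvBsearch tops c 0 tops.length
  if lo = tops.length then tops ++ [c] else tops.set lo c

def minimum_stacks_alt (container_schedule : List Int) : Int :=
  ((container_schedule.foldl pvBStep []).length : Int)

-- ===== PRECONDITION & SPEC =====
def Spec_minimum_stacks (container_schedule : List Int) (out : Int) : Prop := out = minimum_stacks_alt container_schedule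
instance (container_schedule : List Int) (out : Int) : Decidable (Spec_minimum_stacks container_schedule out) := by unfold Spec_minimum_stacks; infer_instance

-- ===== CLAIM (what is proved, stated in full; the proofs are below) =====
def Claim_equal_minimum_stacks : Prop := ∀ (container_schedule : List Int), Dom_minimum_stacks container_schedule → Spec_minimum_stacks container_schedule (minimum_stacks container_schedule)

-- ===== LEMMAS AND PROOFS =====

-- top of a stack, as A reads it: stack[-1] (stks are never empty, default irrelevant)
def pvTop (s : List Int) : Int := (PySem.List.pyGet? s (-1)).getD 0

-- reference step: replace the first element ≥ c by c, else append c
def pvRefStep : List Int → Int → List Int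
  | [], c => [c]
  | t :: rest, c => if t ≥ c then c :: rest else t :: pvRefStep rest c

-- index of the first element ≥ c (length if none)
def pvFirstGE : List Int → Int → Nat
  | [], _ => 0
  | t :: rest, c => if t ≥ c then 0 else pvFirstGE rest c + 1

lemma pvTop_singleton (c : Int) : pvTop [c] = c := by
  simp [pvTop, PySem.List.pyGet?_neg_one]

lemma pvTop_append (s : List Int) (c : Int) : pvTop (s ++ [c]) = c := by
  simp [pvTop, PySem.List.pyGet?_neg_one_append_singleton]

-- A's inner loop, viewed through the tops, is the reference step
lemma map_pvAStep (stks : List (List Int)) (c : Int) :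
    (pvAStep stks c).map pvTop = pvRefStep (stks.map pvTop) c := by
  induction stks with
  | nil => simp [pvAStep, pvRefStep, pvTop_singleton]
  | cons s rest ih =>
    by_cases h : (PySem.List.pyGet? s (-1)).getD 0 ≥ c
    · have h' : pvTop s ≥ c := h
      simp only [pvAStep, if_pos h, List.map_cons, pvRefStep, if_pos h', pvTop_append]
    · have h' : ¬ pvTop s ≥ c := h
      simp only [pvAStep, if_neg h, List.map_cons, pvRefStep, if_neg h', ih]

lemma pvFirstGE_le (tops : List Int) (c : Int) : pvFirstGE tops c ≤ tops.length := by
  induction tops with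
  | nil => simp [pvFirstGE]
  | cons t rest ih =>
    by_cases h : t ≥ c
    · simp [pvFirstGE, h]
    · simp [pvFirstGE, h]; omega

lemma pvRefStep_eq_set (tops : List Int) (c : Int) :
    pvRefStep tops c =
      if pvFirstGE tops c = tops.length then tops ++ [c]
      else tops.set (pvFirstGE tops c) c := by
  induction tops with
  | nil => simp [pvRefStep, pvFirstGE]
  | cons t rest ih =>
    by_cases h : t ≥ c
    · have : ¬ (0 = rest.length + 1) := by omega
      simp [pvRefStep, pvFirstGE, h]
    · have hle := pvFirstGE_le rest c
      by_cases he : pvFirstGE rest c = rest.length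
      · simp [pvRefStep, pvFirstGE, h, he, ih]
      · have : ¬ (pvFirstGE rest c + 1 = rest.length + 1) := by omega
        simp [pvRefStep, pvFirstGE, h, he, ih]

-- below the first index ≥ c, everything is < c
lemma pvFirstGE_below (tops : List Int) (c : Int) :
    ∀ i, i < pvFirstGE tops c → tops.getD i 0 < c := by
  induction tops with
  | nil => simp [pvFirstGE]
  | cons t rest ih =>
    intro i hi
    by_cases h : t ≥ c
    · simp [pvFirstGE, h] at hi
    · simp [pvFirstGE, h] at hi
      cases i with
      | zero => simpa using (by omega : t < c)
      | succ j => simpa using ih j (by omega)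

-- at and above it, everything is ≥ c (needs sortedness)
lemma pvFirstGE_above (tops : List Int) (c : Int) (hs : tops.Pairwise (· < ·)) :
    ∀ i, pvFirstGE tops c ≤ i → i < tops.length → c ≤ tops.getD i 0 := by
  induction tops with
  | nil => simp
  | cons t rest ih =>
    intro i hk hi
    rcases List.pairwise_cons.mp hs with ⟨hlt, hrest⟩
    by_cases h : t ≥ c
    · cases i with
      | zero => simpa using h
      | succ j =>
        have hj : j < rest.length := by simp at hi; omega
        have hlt' := hlt _ (List.getElem_mem hj)
        rw [List.getD_cons_succ, List.getD_eq_getElem rest 0 hj]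
        omega
    · simp [pvFirstGE, h] at hk
      cases i with
      | zero => omega
      | succ j =>
        simp at hi ⊢
        exact ih hrest j (by omega) (by omega)

-- binary search on a sorted tops list finds exactly pvFirstGE
lemma pvBsearch_eq (tops : List Int) (c : Int) (hs : tops.Pairwise (· < ·)) :
    ∀ n lo hi, hi - lo ≤ n → lo ≤ pvFirstGE tops c → pvFirstGE tops c ≤ hi →
      hi ≤ tops.length → pvBsearch tops c lo hi = pvFirstGE tops c := by
  intro n
  induction n with
  | zero =>
    intro lo hi hfuel h1 h2 h3
    rw [pvBsearch]
    have : ¬ lo < hi := by omega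
    simp [this]; omega
  | succ m ih =>
    intro lo hi hfuel h1 h2 h3
    rw [pvBsearch]
    by_cases hlt : lo < hi
    · simp only [hlt, if_true]
      have hmid1 : lo ≤ (lo + hi) / 2 := by omega
      have hmid2 : (lo + hi) / 2 < hi := by omega
      have hm : (lo + hi) / 2 < tops.length := by omega
      have hget : (PySem.List.pyGet? tops (((lo + hi) / 2 : Nat) : Int)).getD 0
          = tops.getD ((lo + hi) / 2) 0 := by
        rw [PySem.List.pyGet?_natCast]
        simp [List.getD]
      by_cases hc : tops.getD ((lo + hi) / 2) 0 ≥ c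
      · have hk : pvFirstGE tops c ≤ (lo + hi) / 2 := by
          by_contra hlt'
          exact absurd hc (not_le.mpr (pvFirstGE_below tops c _ (by omega)))
        simp only [hget, hc, if_true]
        exact ih lo ((lo + hi) / 2) (by omega) h1 hk (by omega)
      · have hk : (lo + hi) / 2 < pvFirstGE tops c := by
          by_contra hge
          exact hc (pvFirstGE_above tops c hs _ (by omega) hm)
        simp only [hget, if_neg (by omega : ¬ tops.getD ((lo + hi) / 2) 0 ≥ c)]
        exact ih ((lo + hi) / 2 + 1) hi (by omega) (by omega) h2 h3
    · simp [hlt]; omega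

-- Source B's step equals the reference step on a sorted tops list
lemma pvBStep_eq (tops : List Int) (c : Int) (hs : tops.Pairwise (· < ·)) :
    pvBStep tops c = pvRefStep tops c := by
  have hb : pvBsearch tops c 0 tops.length = pvFirstGE tops c :=
    pvBsearch_eq tops c hs tops.length 0 tops.length (by omega) (by omega)
      (pvFirstGE_le tops c) (le_refl _)
  rw [pvBStep, pvRefStep_eq_set]
  simp [hb]

lemma mem_pvRefStep {x : Int} (tops : List Int) (c : Int) :
    x ∈ pvRefStep tops c → x = c ∨ x ∈ tops := by
  induction tops with
  | nil => simp [pvRefStep]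
  | cons t rest ih =>
    by_cases h : t ≥ c <;> simp [pvRefStep, h]
    · tauto
    · intro hx
      rcases hx with hx | hx
      · tauto
      · rcases ih hx with hx | hx <;> tauto

-- the reference step keeps the tops strictly increasing
lemma pvRefStep_pairwise (tops : List Int) (c : Int) (hs : tops.Pairwise (· < ·)) :
    (pvRefStep tops c).Pairwise (· < ·) := by
  induction tops with
  | nil => simp [pvRefStep]
  | cons t rest ih =>
    rcases List.pairwise_cons.mp hs with ⟨hlt, hrest⟩
    by_cases h : t ≥ c
    · simp [pvRefStep, h]
      exact ⟨fun x hx => lt_of_le_of_lt h (hlt x hx), hrest⟩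
    · simp [pvRefStep, h]
      refine ⟨fun x hx => ?_, ih hrest⟩
      rcases mem_pvRefStep rest c hx with rfl | hx
      · omega
      · exact hlt x hx
  
-- fold invariant: A's stks seen through pvTop are exactly B's tops
lemma pv_fold_eq (cs : List Int) :
    ∀ stks tops, stks.map pvTop = tops → tops.Pairwise (· < ·) →
      (cs.foldl pvAStep stks).map pvTop = cs.foldl pvBStep tops := by
  induction cs with
  | nil => intro stks tops h _; simpa using h
  | cons c cs ih =>
    intro stks tops h hs
    simp only [List.foldl_cons]
    rw [pvBStep_eq tops c hs]
    exact ih _ _ (by rw [map_pvAStep, h]) (pvRefStep_pairwise tops c hs)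

-- ===== VERDICT (by name: the statement is the Claim_ definition above) =====
theorem minimum_stacks_spec : Claim_equal_minimum_stacks := by
  intro cs _
  show minimum_stacks cs = minimum_stacks_alt cs
  unfold minimum_stacks minimum_stacks_alt
  have h := pv_fold_eq cs [] [] (by simp) (by simp)
  have : (cs.foldl pvAStep []).length = (cs.foldl pvBStep []).length := by
    rw [← h, List.length_map]
  rw [this]
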